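-- pv_equiv track=rewrite | github.com/edrcosta/foobar-challenge | test_2/solution.py | solution
-- ===== SOURCE A (Python) =====
-- def solution(s):
--     greetings_number = 0
--     exclude = [" ", "-"]
--
--     _s = []
--     for i, char in enumerate(list(s)):
--         if not char in exclude:
--           _s.append(char)
--
--     s = _s
--     for i, char in enumerate(list(s)):
--         if char == '>':
--             for ii, char2 in enumerate(list(s)):
--                 if ii > i and char2 == '<':
--                     greetings_number+=2
--     return greetings_number
-- ===== SOURCE B (Python) =====
-- def solution(s):
--     greetings_number = 0
--     gt = 0
--     for char in s:
--         if char == '>':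
--             gt += 1
--         elif char == '<':
--             greetings_number += 2 * gt
--     return greetings_number
-- ===== Notes on version B (the rewrite author's own statement) =====
-- stated objective: faster
-- what changed: Replaced the filter pass plus the quadratic nested scan (for each '>' rescan the whole list for later '<') by a single left-to-right pass that keeps a running count of '>' seen and adds 2*count at each '<'; the filter pass is dropped since characters other than '>'/'<' never affect the pair count.
import Mathlib
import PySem

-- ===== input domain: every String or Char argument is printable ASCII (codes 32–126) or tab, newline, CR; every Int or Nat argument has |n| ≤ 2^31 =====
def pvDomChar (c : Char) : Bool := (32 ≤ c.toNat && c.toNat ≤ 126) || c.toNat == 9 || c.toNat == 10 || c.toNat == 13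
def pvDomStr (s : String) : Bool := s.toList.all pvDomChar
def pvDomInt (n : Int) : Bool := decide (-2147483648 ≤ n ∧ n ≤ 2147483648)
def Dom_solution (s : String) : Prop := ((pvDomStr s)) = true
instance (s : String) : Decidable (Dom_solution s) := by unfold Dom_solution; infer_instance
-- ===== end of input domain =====

-- B replaces A's filter pass + quadratic nested scan by one linear pass counting '>' seen so far (faster, asymptotic).


-- ===== PORT A =====
-- first loop of A: copy s into _s skipping excluded characters
def solutionFiltered (s : String) : List Char :=
  (PySem.List.enumerate s.toList).foldl
    (fun acc (p : Int × Char) => if ¬ p.2 ∈ ([' ', '-'] : List Char) then acc ++ [p.2] else acc) []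

def solution (s : String) : Int :=
  (PySem.List.enumerate (solutionFiltered s)).foldl
    (fun acc (p : Int × Char) =>
      if p.2 = '>' then
        (PySem.List.enumerate (solutionFiltered s)).foldl
          (fun acc2 (q : Int × Char) => if q.1 > p.1 ∧ q.2 = '<' then acc2 + 2 else acc2) acc
      else acc) 0

-- ===== PORT B =====
-- state = (greetings_number, gt)
def solution_alt (s : String) : Int :=
  (s.toList.foldl
    (fun (p : Int × Int) (c : Char) =>
      if c = '>' then (p.1, p.2 + 1)
      else if c = '<' then (p.1 + 2 * p.2, p.2)
      else p) (0, 0)).1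

-- ===== PRECONDITION & SPEC =====
def Spec_solution (s : String) (out : Int) : Prop := out = solution_alt s
instance (s : String) (out : Int) : Decidable (Spec_solution s out) := by unfold Spec_solution; infer_instance

-- ===== CLAIM (what is proved, stated in full; the proofs are below) =====
def Claim_equal_solution : Prop := ∀ (s : String), Dom_solution s → Spec_solution s (solution s)

-- ===== LEMMAS AND PROOFS =====

/-- number of '<' in a list, as an Int -/
def cntLt (l : List Char) : Int := (l.countP (· == '<') : Int)

/-- reference value: 2 · #{ i < j | l[i] = '>', l[j] = '<' } -/
def g : List Char → Int
  | [] => 0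
  | c :: t => (if c = '>' then 2 * cntLt t else 0) + g t

theorem cntLt_cons (c : Char) (t : List Char) :
    cntLt (c :: t) = (if c = '<' then 1 else 0) + cntLt t := by
  simp [cntLt, List.countP_cons]
  by_cases h : c = '<' <;> simp [h]
  ring

-- B's fold computes g
theorem alt_fold (l : List Char) (a b : Int) :
    (l.foldl (fun (p : Int × Int) (c : Char) =>
      if c = '>' then (p.1, p.2 + 1)
      else if c = '<' then (p.1 + 2 * p.2, p.2)
      else p) (a, b)).1 = a + 2 * b * cntLt l + g l := by
  induction l generalizing a b with
  | nil => simp [cntLt, g]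
  | cons c t ih =>
    by_cases h1 : c = '>'
    · simp [h1, List.foldl_cons, ih, g, cntLt_cons]; ring
    · by_cases h2 : c = '<'
      · simp [h2, List.foldl_cons, ih, g, cntLt_cons]; ring
      · simp [h1, h2, List.foldl_cons, ih, g, cntLt_cons]

-- A's filter loop builds List.filter
theorem filter_fold (l : List Char) (m : Int) (acc : List Char) (ex : List Char) :
    (PySem.List.enumerate l m).foldl
      (fun acc (p : Int × Char) => if ¬ p.2 ∈ ex then acc ++ [p.2] else acc) acc
    = acc ++ l.filter (fun c => ¬ c ∈ ex) := by
  induction l generalizing m acc with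
  | nil => simp [PySem.List.enumerate_nil]
  | cons c t ih =>
    rw [PySem.List.enumerate_cons, List.foldl_cons, List.filter_cons]
    by_cases h : c ∈ ex
    · rw [if_neg (by simp [h]), ih]
      simp [h]
    · rw [if_pos (by simp [h]), ih]
      simp [h]

-- removing characters that are neither '>' nor '<' changes neither cntLt nor g
theorem cntLt_filter (l : List Char) (keep : Char → Prop) [DecidablePred keep]
    (hlt : keep '<') : cntLt (l.filter (fun c => decide (keep c))) = cntLt l := by
  induction l with
  | nil => rfl
  | cons c t ih =>
    by_cases h : keep c
    · simp [h, cntLt_cons, ih]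
    · have hne : c ≠ '<' := fun he => h (he ▸ hlt)
      simp [h, cntLt_cons, hne, ih]

theorem g_filter (l : List Char) (keep : Char → Prop) [DecidablePred keep]
    (hgt : keep '>') (hlt : keep '<') :
    g (l.filter (fun c => decide (keep c))) = g l := by
  induction l with
  | nil => rfl
  | cons c t ih =>
    by_cases h : keep c
    · simp [h, g, ih, cntLt_filter t keep hlt]
    · have hne : c ≠ '>' := fun he => h (he ▸ hgt)
      simp [h, g, ih, hne]

-- A's inner loop counts '<' beyond index i
theorem inner_fold (L : List Char) (m i acc : Int) :
    (PySem.List.enumerate L m).foldl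
      (fun acc2 (q : Int × Char) => if q.1 > i ∧ q.2 = '<' then acc2 + 2 else acc2) acc
    = acc + 2 * cntLt (L.drop (i + 1 - m).toNat) := by
  induction L generalizing m acc with
  | nil => simp [PySem.List.enumerate_nil, cntLt]
  | cons c t ih =>
    rw [PySem.List.enumerate_cons, List.foldl_cons]
    by_cases hm : m > i
    · have h0 : (i + 1 - m).toNat = 0 := by omega
      have h0' : (i + 1 - (m + 1)).toNat = 0 := by omega
      rw [ih (m + 1), h0, h0', List.drop_zero, List.drop_zero]
      by_cases hc : c = '<'
      · rw [if_pos ⟨hm, hc⟩, cntLt_cons, if_pos hc]; ring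
      · rw [if_neg (fun h => hc h.2), cntLt_cons, if_neg hc]; ring
    · have hcond : ¬ (m > i ∧ c = '<') := fun h => hm h.1
      have hs : (i + 1 - m).toNat = (i + 1 - (m + 1)).toNat + 1 := by omega
      rw [if_neg hcond, ih (m + 1), hs, List.drop_succ_cons]

-- A's outer loop over a suffix of L (starting at index k) adds g of that suffix
theorem outer_fold (l L : List Char) (k : Nat) (acc : Int) (h : L.drop k = l) :
    (PySem.List.enumerate l (k : Int)).foldl
      (fun acc (p : Int × Char) =>
        if p.2 = '>' then
          (PySem.List.enumerate L).foldl
            (fun acc2 (q : Int × Char) => if q.1 > p.1 ∧ q.2 = '<' then acc2 + 2 else acc2) acc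
        else acc) acc
    = acc + g l := by
  induction l generalizing k acc with
  | nil => simp [PySem.List.enumerate_nil, g]
  | cons c t ih =>
    rw [PySem.List.enumerate_cons, List.foldl_cons]
    have ht : L.drop (k + 1) = t := by
      rw [← List.tail_drop, h, List.tail_cons]
    have hcast : ((k : Int) + 1) = ((k + 1 : Nat) : Int) := by push_cast; ring
    by_cases hc : c = '>'
    · rw [if_pos hc, inner_fold, hcast, ih (k + 1) _ ht]
      have hdk : (((k + 1 : Nat) : Int) - 0).toNat = k + 1 := by omega
      rw [hdk, ht, g, if_pos hc]
      ring
    · rw [if_neg hc, hcast, ih (k + 1) _ ht, g, if_neg hc]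
      ring

theorem solution_eq_g (s : String) : solution s = g s.toList := by
  have hfil : solutionFiltered s
      = s.toList.filter (fun c => decide (¬ (c = ' ' ∨ c = '-'))) := by
    unfold solutionFiltered
    rw [filter_fold, List.nil_append]
    simp
  have h0 := outer_fold (s.toList.filter (fun c => decide (¬ (c = ' ' ∨ c = '-'))))
      (s.toList.filter (fun c => decide (¬ (c = ' ' ∨ c = '-')))) 0 0 rfl
  rw [Nat.cast_zero] at h0
  unfold solution
  rw [hfil, h0, zero_add,
      g_filter s.toList (fun c => ¬ (c = ' ' ∨ c = '-')) (by simp) (by simp)]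

theorem alt_eq_g (s : String) : solution_alt s = g s.toList := by
  unfold solution_alt
  rw [alt_fold]
  ring

-- ===== VERDICT (by name: the statement is the Claim_ definition above) =====
theorem solution_spec : Claim_equal_solution := by
  intro s _
  unfold Spec_solution
  rw [solution_eq_g, alt_eq_g]
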